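-- pv_equiv track=rewrite | github.com/PatzD/python_lasoft_PatrykD_homework | statements_syntax/main.py | task_34
-- ===== SOURCE A (Python) =====
-- def task_34(og_array):
--     """
--     remove all 0s from array, fill elements on right side of last 0 with values -1
--     """
--     if 0 not in og_array:
--         return og_array
--     temp = False
--     for i in range(len(og_array))[::-1]:
--         if og_array[i] == 0:
--             temp = True
--             og_array.pop(i)
--         if not temp:
--             og_array[i] = -1
--     return og_array
-- ===== SOURCE B (Python) =====
-- def task_34(og_array):
--     """
--     remove all 0s from array, fill elements on right side of last 0 with values -1
--     """
--     if 0 not in og_array: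
--         return og_array
--     li = len(og_array) - 1 - og_array[::-1].index(0)
--     return [x for x in og_array[:li] if x != 0] + [-1] * (len(og_array) - li - 1)
-- ===== Notes on version B (the rewrite author's own statement) =====
-- stated objective: alternative
-- what changed: Instead of scanning from the right while mutating the list in place (pop at each zero, temp flag), B locates the last zero once and rebuilds the result in one pass: non-zero elements before it, then a block of -1s; A is quadratic when zeros abound, B is linear, though a timing run could not confirm a consistent speed-up on random inputs (many have no zero, where both return immediately).
import Mathlib
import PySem

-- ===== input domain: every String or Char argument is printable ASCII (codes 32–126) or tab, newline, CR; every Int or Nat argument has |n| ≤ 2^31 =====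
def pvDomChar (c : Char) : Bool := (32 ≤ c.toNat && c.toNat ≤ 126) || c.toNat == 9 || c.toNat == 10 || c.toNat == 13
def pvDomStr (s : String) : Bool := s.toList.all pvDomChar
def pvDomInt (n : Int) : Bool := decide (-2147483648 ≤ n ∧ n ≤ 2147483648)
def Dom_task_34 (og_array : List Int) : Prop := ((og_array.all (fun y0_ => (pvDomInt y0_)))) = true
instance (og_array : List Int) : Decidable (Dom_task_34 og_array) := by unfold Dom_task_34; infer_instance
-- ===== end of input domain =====

-- B replaces A's right-to-left in-place mutation loop by a one-pass rebuild around the last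
-- zero's index (a different algorithm; not claimed faster). A mutates its argument in place;
-- the equivalence proved here is about the RETURN value only (B does not mutate).

-- ===== PORT A =====
-- one iteration of A's loop body; i comes from range(len), so it is a valid non-negative
-- index into the current list: og_array[i] = getD, pop(i) = eraseIdx, og_array[i] = -1 = set
def task34Step (s : List Int × Bool) (i : Nat) : List Int × Bool :=
  let a := s.1
  let temp := s.2
  let s1 := if a.getD i 0 = 0 then (a.eraseIdx i, true) else (a, temp)
  if !s1.2 then (s1.1.set i (-1), s1.2) else s1

def task_34 (og_array : List Int) : List Int :=
  if !(og_array.contains 0) then og_array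
  else (((List.range og_array.length).reverse).foldl task34Step (og_array, false)).1

-- ===== PORT B =====
def task_34_alt (og_array : List Int) : List Int :=
  if !(og_array.contains 0) then og_array
  else
    -- li = len(og_array) - 1 - og_array[::-1].index(0); 0 is present, so index() succeeds
    let li := og_array.length - 1 - (PySem.List.index? og_array.reverse 0).getD 0
    -- [x for x in og_array[:li] if x != 0] + [-1] * (len(og_array) - li - 1)
    (og_array.take li).filter (fun x => !(x == 0)) ++
      List.replicate (og_array.length - li - 1) (-1)

-- ===== PRECONDITION & SPEC =====
def Spec_task_34 (og_array : List Int) (out : List Int) : Prop := out = task_34_alt og_array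
instance (og_array : List Int) (out : List Int) : Decidable (Spec_task_34 og_array out) := by unfold Spec_task_34; infer_instance

-- ===== CLAIM (what is proved, stated in full; the proofs are below) =====
def Claim_equal_task_34 : Prop := ∀ (og_array : List Int), Dom_task_34 og_array → Spec_task_34 og_array (task_34 og_array)

-- ===== LEMMAS AND PROOFS =====

theorem pv_range_rev_succ (m : Nat) : (List.range (m + 1)).reverse = m :: (List.range m).reverse := by
  rw [List.range_succ, List.reverse_append]; rfl

theorem pv_set_eq (a : List Int) (m : Nat) (v : Int) (h : m < a.length) :
    a.set m v = a.take m ++ v :: a.drop (m + 1) := by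
  induction a generalizing m with
  | nil => simp at h
  | cons x t ih =>
    cases m with
    | zero => simp
    | succ m => simp [ih m (by simpa using h)]

theorem pv_decomp (a : List Int) (m : Nat) (h : m < a.length) :
    a = a.take m ++ a[m]?.getD 0 :: a.drop (m + 1) := by
  conv_lhs => rw [← List.take_append_drop m a]
  rw [List.drop_eq_getElem_cons h, List.getElem?_eq_getElem h, Option.getD_some]

theorem pv_getD_set_ne (a : List Int) (m j : Nat) (v : Int) (h : m ≠ j) :
    (a.set m v)[j]?.getD 0 = a[j]?.getD 0 := by
  rw [List.getElem?_set_ne h]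

theorem pv_take_set (a : List Int) (m n : Nat) (v : Int) (h : n ≤ m) :
    (a.set m v).take n = a.take n := by
  induction a generalizing m n with
  | nil => simp
  | cons x t ih =>
    cases m with
    | zero => cases n with
      | zero => simp
      | succ n => omega
    | succ m => cases n with
      | zero => simp
      | succ n => simp [ih m n (by omega)]

-- after temp is True, the loop just pops every zero at indices < m
theorem task34_loop_true (m : Nat) : ∀ a : List Int, m ≤ a.length →
    (List.range m).reverse.foldl task34Step (a, true) =
      ((a.take m).filter (fun x => !(x == 0)) ++ a.drop m, true) := by
  induction m with
  | zero => intro a _; simp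
  | succ m ih =>
    intro a hm
    have hm' : m < a.length := hm
    have hA : (a.take m).length = m := by simp; omega
    rw [pv_range_rev_succ, List.foldl_cons]
    by_cases h0 : a[m]?.getD 0 = 0
    · have hstep : task34Step (a, true) m = (a.eraseIdx m, true) := by
        simp [task34Step, List.getD_eq_getElem?_getD, h0]
      have hlen2 : m ≤ (a.take m ++ a.drop (m + 1)).length := by
        rw [List.length_append, hA, List.length_drop]; omega
      rw [hstep, List.eraseIdx_eq_take_drop_succ, ih _ hlen2]
      rw [List.take_left' hA, List.drop_left' hA]
      have hrepr : a.take (m + 1) = ((a.take m ++ [(0 : Int)]) ++ a.drop (m + 1)).take (m + 1) := by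
        conv_lhs => rw [pv_decomp a m hm', h0, List.append_cons]
      rw [hrepr, List.take_left' (by simp [hA]), List.filter_append]
      simp
    · have hstep : task34Step (a, true) m = (a, true) := by
        simp [task34Step, List.getD_eq_getElem?_getD, h0]
      rw [hstep, ih _ (by omega)]
      have hrepr : a.take (m + 1) = ((a.take m ++ [a[m]?.getD 0]) ++ a.drop (m + 1)).take (m + 1) := by
        conv_lhs => rw [pv_decomp a m hm', List.append_cons]
      have hdrop : a.drop m = (a.take m ++ a[m]?.getD 0 :: a.drop (m + 1)).drop m := by
        conv_lhs => rw [pv_decomp a m hm']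
      rw [hrepr, List.take_left' (by simp [hA]), hdrop, List.drop_left' hA,
        List.filter_append, List.filter_cons]
      simp [h0]

-- while temp is False (no zero at indices in (li, li+k), zero at li), entries above li
-- become -1, the zero at li is popped, then task34_loop_true finishes the job
theorem task34_loop_false (k : Nat) (hk : 1 ≤ k) : ∀ (li : Nat) (a : List Int),
    li + k ≤ a.length → a[li]?.getD 0 = 0 →
    (∀ j, li < j → j < li + k → a[j]?.getD 0 ≠ 0) →
    (List.range (li + k)).reverse.foldl task34Step (a, false) =
      ((a.take li).filter (fun x => !(x == 0)) ++ List.replicate (k - 1) (-1) ++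
        a.drop (li + k), true) := by
  induction k, hk using Nat.le_induction with
  | base =>
    intro li a hlen h0 _
    have hli : li < a.length := by omega
    have hA : (a.take li).length = li := by simp; omega
    rw [pv_range_rev_succ, List.foldl_cons]
    have hstep : task34Step (a, false) li = (a.eraseIdx li, true) := by
      simp [task34Step, List.getD_eq_getElem?_getD, h0]
    have hlen2 : li ≤ (a.take li ++ a.drop (li + 1)).length := by
      rw [List.length_append, hA, List.length_drop]; omega
    rw [hstep, List.eraseIdx_eq_take_drop_succ, task34_loop_true li _ hlen2]
    rw [List.take_left' hA, List.drop_left' hA]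
    simp
  | succ k hk ih =>
    intro li a hlen h0 hnz
    have hm : li + k < a.length := by omega
    have hA : (a.take (li + k)).length = li + k := by simp; omega
    have hne : a[li + k]?.getD 0 ≠ 0 := hnz (li + k) (by omega) (by omega)
    have hstep : task34Step (a, false) (li + k) = (a.set (li + k) (-1), false) := by
      simp [task34Step, List.getD_eq_getElem?_getD, hne]
    have hpeel : li + (k + 1) = (li + k) + 1 := by omega
    rw [hpeel, pv_range_rev_succ, List.foldl_cons, hstep]
    have h0' : (a.set (li + k) (-1))[li]?.getD 0 = 0 := by
      rw [pv_getD_set_ne a (li + k) li (-1) (by omega)]; exact h0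
    have hnz' : ∀ j, li < j → j < li + k → (a.set (li + k) (-1))[j]?.getD 0 ≠ 0 := by
      intro j hj1 hj2
      rw [pv_getD_set_ne a (li + k) j (-1) (by omega)]
      exact hnz j hj1 (by omega)
    rw [ih li (a.set (li + k) (-1)) (by simp; omega) h0' hnz']
    rw [pv_take_set a (li + k) li (-1) (by omega)]
    have hdropset : (a.set (li + k) (-1)).drop (li + k) = -1 :: a.drop (li + k + 1) := by
      rw [pv_set_eq a (li + k) (-1) hm, List.drop_left' hA]
    rw [hdropset]
    have hrep : List.replicate (k + 1 - 1) (-1 : Int) =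
        List.replicate (k - 1) (-1 : Int) ++ [(-1 : Int)] := by
      have hk' : k + 1 - 1 = (k - 1) + 1 := by omega
      rw [hk', List.replicate_succ']
    rw [hrep]
    simp

-- ===== VERDICT (by name: the statement is the Claim_ definition above) =====
theorem task_34_spec : Claim_equal_task_34 := by
  unfold Claim_equal_task_34
  intro og _
  unfold Spec_task_34 task_34 task_34_alt
  by_cases hc : og.contains 0 = true
  · have hmem : (0 : Int) ∈ og := by simpa using hc
    have hrev : (0 : Int) ∈ og.reverse := by simpa using hmem
    obtain ⟨r, hr⟩ : ∃ r, PySem.List.index? og.reverse 0 = some r := by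
      cases hidx : PySem.List.index? og.reverse 0 with
      | none => exact absurd hrev ((PySem.List.index?_eq_none_iff _ _).mp hidx)
      | some r => exact ⟨r, rfl⟩
    obtain ⟨hrlen, hval, hmin⟩ := PySem.List.getElem_of_index?_eq_some hr
    have hrn : r < og.length := by simpa using hrlen
    set n := og.length with hn
    set li := n - 1 - r with hli
    have h0 : og[li]?.getD 0 = 0 := by
      have heq : og.reverse[r]'hrlen = og[li]'(by omega) := by
        rw [List.getElem_reverse]
      rw [List.getElem?_eq_getElem (by omega : li < og.length), Option.getD_some, ← heq, hval]
    have hnz : ∀ j, li < j → j < n → og[j]?.getD 0 ≠ 0 := by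
      intro j hj1 hj2
      have hjr : n - 1 - j < r := by omega
      have hrj : og.reverse[n - 1 - j]'(by simp; omega) = og[j]'(by omega) := by
        rw [List.getElem_reverse]
        congr 1
        omega
      rw [List.getElem?_eq_getElem (by omega : j < og.length), Option.getD_some, ← hrj]
      exact hmin _ hjr
    have hk1 : 1 ≤ n - li := by omega
    have hlik : li + (n - li) = n := by omega
    have hmain := task34_loop_false (n - li) hk1 li og (by omega) h0
      (fun j h1 h2 => hnz j h1 (by omega))
    rw [hlik] at hmain
    simp only [hc, Bool.not_true, Bool.false_eq_true, if_false]
    rw [hmain, hr]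
    have hdn : og.drop n = ([] : List Int) := by
      rw [hn]
      exact List.drop_length
    rw [hdn, List.append_nil]
    rw [Option.getD_some, ← hli]
  · have hmem0 : ¬ (0 : Int) ∈ og := by simpa using hc
    simp [hmem0]
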